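-- pv_equiv track=rewrite | github.com/DigitalHallucinations/ATLAS | modules/Tools/Base_Tools/roadmap_service.py | _normalize_milestones
-- ===== SOURCE A (Python) =====
-- from typing import Mapping, MutableMapping, Optional, Sequence
--
-- def _normalize_milestones(milestones: Optional[Sequence[str]]) -> tuple[str, ...]:
--     if not milestones:
--         return tuple()
--     normalized: list[str] = []
--     for milestone in milestones:
--         if not isinstance(milestone, str):
--             continue
--         candidate = milestone.strip()
--         if candidate:
--             normalized.append(candidate)
--     return tuple(dict.fromkeys(normalized))
-- ===== SOURCE B (Python) =====
-- from typing import Optional, Sequence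
--
-- def _normalize_milestones(milestones: Optional[Sequence[str]]) -> tuple[str, ...]:
--     if not milestones:
--         return tuple()
--     cands = [m.strip() for m in milestones if isinstance(m, str) and m.strip()]
--     out = []
--     while cands:
--         head = cands[0]
--         out.append(head)
--         cands = [c for c in cands[1:] if c != head]
--     return tuple(out)
-- ===== Notes on version B (the rewrite author's own statement) =====
-- stated objective: alternative
-- what changed: Dedup is done without any hash structure: after a comprehension collects the stripped non-empty candidates, a while loop repeatedly takes the first remaining candidate and filters every later equal string out of the remainder (nub by tail filtering), instead of A's dict.fromkeys pass.
import Mathlib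
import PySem

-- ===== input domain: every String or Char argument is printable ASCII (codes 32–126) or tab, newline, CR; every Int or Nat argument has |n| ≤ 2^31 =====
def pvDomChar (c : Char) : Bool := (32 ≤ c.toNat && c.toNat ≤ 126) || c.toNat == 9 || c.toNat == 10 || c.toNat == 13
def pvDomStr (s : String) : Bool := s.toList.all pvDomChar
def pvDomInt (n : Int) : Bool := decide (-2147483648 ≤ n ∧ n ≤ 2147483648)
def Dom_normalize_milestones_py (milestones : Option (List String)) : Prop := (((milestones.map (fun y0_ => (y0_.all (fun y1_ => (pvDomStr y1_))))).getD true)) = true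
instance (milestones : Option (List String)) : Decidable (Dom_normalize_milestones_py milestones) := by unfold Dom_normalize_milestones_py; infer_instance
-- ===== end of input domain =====

-- B replaces A's dict.fromkeys dedup pass by a nub-style while loop: take the first remaining candidate and filter every later equal string out of the tail; no dict/set is built (alternative algorithm, O(n^2)).


-- ===== PORT A =====
-- literal port of A: `if not milestones` guard, filter/strip loop appending into `normalized`,
-- then `tuple(dict.fromkeys(normalized))` = PySem.List.dedup (first occurrences, in order).
-- (the `isinstance(milestone, str)` guard is always true under the List String typing)
def normalize_milestones_py (milestones : Option (List String)) : List String :=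
  match milestones with
  | none => []
  | some xs =>
    if xs = [] then []
    else
      let normalized : List String := xs.foldl (fun acc milestone =>
        let candidate := PySem.Str.strip milestone
        if candidate = "" then acc else acc ++ [candidate]) []
      PySem.List.dedup normalized

-- ===== PORT B =====
-- the while loop of Source B: out.append(cands[0]); cands = [c for c in cands[1:] if c != head]
def pvNubLoop : List String → List String
  | [] => []
  | head :: rest => head :: pvNubLoop (rest.filter (fun c => c ≠ head))
termination_by l => l.length
decreasing_by
  have h := List.length_filter_le (fun x : {x // x ∈ rest} => !decide (↑x = head)) rest.attach
  simp at h ⊢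
  omega

-- literal port of B: the guard, the comprehension collecting stripped non-empty candidates,
-- then the nub-by-tail-filtering while loop.
def normalize_milestones_py_alt (milestones : Option (List String)) : List String :=
  match milestones with
  | none => []
  | some xs =>
    if xs = [] then []
    else
      let cands : List String :=
        (xs.filter (fun m => PySem.Str.strip m ≠ "")).map PySem.Str.strip
      pvNubLoop cands

-- ===== PRECONDITION & SPEC =====
def Spec_normalize_milestones_py (milestones : Option (List String)) (out : List String) : Prop := out = normalize_milestones_py_alt milestones
instance (milestones : Option (List String)) (out : List String) : Decidable (Spec_normalize_milestones_py milestones out) := by unfold Spec_normalize_milestones_py; infer_instance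

-- ===== CLAIM (what is proved, stated in full; the proofs are below) =====
def Claim_equal_normalize_milestones_py : Prop := ∀ (milestones : Option (List String)), Dom_normalize_milestones_py milestones → Spec_normalize_milestones_py milestones (normalize_milestones_py milestones)

-- ===== LEMMAS AND PROOFS =====

-- A's append loop builds exactly the filter/map comprehension of B
lemma pvA_loop (xs : List String) (acc : List String) :
    xs.foldl (fun acc milestone =>
        let candidate := PySem.Str.strip milestone
        if candidate = "" then acc else acc ++ [candidate]) acc
      = acc ++ (xs.filter (fun m => PySem.Str.strip m ≠ "")).map PySem.Str.strip := by
  induction xs generalizing acc with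
  | nil => simp
  | cons m xs ih =>
    by_cases h : PySem.Str.strip m = "" <;> simp [h, ih]

-- adding elements already dropped by the filter does not change Set accumulation
lemma pv_foldl_add_filter (a : String) (l : List String) (s : PySem.Set String)
    (ha : a ∈ s) :
    (l.filter (fun c => c ≠ a)).foldl PySem.Set.add s = l.foldl PySem.Set.add s := by
  induction l generalizing s with
  | nil => rfl
  | cons x t ih =>
    by_cases hx : x = a
    · subst hx
      have hadd : PySem.Set.add s x = s := PySem.Set.add_of_mem ha
      simpa [hadd] using ih s ha
    · have ha' : a ∈ PySem.Set.add s x := by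
        simp [PySem.Set.mem_add, ha]
      simp only [List.filter_cons, decide_eq_true_eq]
      rw [if_pos hx]
      simpa using ih (PySem.Set.add s x) ha'

-- an element absent from l stays in front of the accumulation
lemma pv_foldl_add_cons (h : String) (l : List String) (s : List String)
    (hl : h ∉ l) :
    l.foldl PySem.Set.add (h :: s) = h :: l.foldl PySem.Set.add s := by
  induction l generalizing s with
  | nil => rfl
  | cons x t ih =>
    have hxh : x ≠ h := fun e => hl (by simp [e])
    have ht : h ∉ t := fun e => hl (by simp [e])
    have : PySem.Set.add (h :: s) x = h :: PySem.Set.add s x := by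
      simp only [PySem.Set.add, PySem.Set.contains, List.contains_cons]
      split_ifs with h1 h2 h2 <;> simp_all
    rw [List.foldl_cons, this, List.foldl_cons]
    exact ih _ ht

-- dict.fromkeys dedup equals nub by tail filtering
lemma pv_dedup_eq_nub (l : List String) : PySem.List.dedup l = pvNubLoop l := by
  induction hl : l.length using Nat.strong_induction_on generalizing l with
  | _ n ih =>
    match l with
    | [] => simp [pvNubLoop, PySem.List.dedup_eq_ofList, PySem.Set.ofList_eq_foldl]
    | head :: rest =>
      have h1 : PySem.List.dedup (head :: rest) = rest.foldl PySem.Set.add [head] := by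
        simp [PySem.List.dedup_eq_ofList, PySem.Set.ofList_eq_foldl, PySem.Set.add,
          PySem.Set.contains]
      have h2 : rest.foldl PySem.Set.add [head]
          = (rest.filter (fun c => c ≠ head)).foldl PySem.Set.add [head] :=
        (pv_foldl_add_filter head rest [head] (by simp)).symm
      have hnot : head ∉ rest.filter (fun c => c ≠ head) := by
        intro hmem
        simpa using (List.of_mem_filter hmem)
      have h3 : (rest.filter (fun c => c ≠ head)).foldl PySem.Set.add [head]
          = head :: (rest.filter (fun c => c ≠ head)).foldl PySem.Set.add [] :=
        pv_foldl_add_cons head _ [] hnot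
      have h4 : (rest.filter (fun c => c ≠ head)).foldl PySem.Set.add ([] : List String)
          = PySem.List.dedup (rest.filter (fun c => c ≠ head)) := by
        simp [PySem.List.dedup_eq_ofList, PySem.Set.ofList_eq_foldl]
      have hlt : (rest.filter (fun c => c ≠ head)).length < n := by
        subst hl
        simpa using Nat.lt_succ_of_le (List.length_filter_le _ _)
      rw [h1, h2, h3, h4, ih _ hlt _ rfl, pvNubLoop]

-- ===== VERDICT (by name: the statement is the Claim_ definition above) =====
theorem normalize_milestones_py_spec : Claim_equal_normalize_milestones_py := by
  intro milestones _
  unfold Spec_normalize_milestones_py normalize_milestones_py normalize_milestones_py_alt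
  match milestones with
  | none => rfl
  | some xs =>
    by_cases hxs : xs = []
    · simp [hxs]
    · simp only [hxs, if_false]
      rw [pvA_loop]
      simpa using pv_dedup_eq_nub _
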